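-- pv_equiv track=rewrite | github.com/mirzarend/mini-project-ke-4 | Dictionary Produk.py | produk_termahal_dan_termurah
-- ===== SOURCE A (Python) =====
-- def produk_termahal_dan_termurah(x) :
--   termahal = x[0]
--   termurah = x[0]
--   for barang in x :
--     if barang['harga'] > termahal['harga'] :
--       termahal = barang
--     elif barang['harga'] < termurah['harga'] :
--       termurah = barang
--   return termahal,termurah
-- ===== SOURCE B (Python) =====
-- def produk_termahal_dan_termurah(x):
--     naik = sorted(x, key=lambda b: b['harga'])
--     turun = sorted(x, key=lambda b: b['harga'], reverse=True)
--     return turun[0], naik[0]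
-- ===== Notes on version B (the rewrite author's own statement) =====
-- stated objective: alternative
-- what changed: Replaces the single combined comparison loop with a sort-based approach: two stable sorts by price and picking each head, which preserves first-occurrence tie semantics because Python's sort (including reverse=True) is stable.
import Mathlib
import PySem

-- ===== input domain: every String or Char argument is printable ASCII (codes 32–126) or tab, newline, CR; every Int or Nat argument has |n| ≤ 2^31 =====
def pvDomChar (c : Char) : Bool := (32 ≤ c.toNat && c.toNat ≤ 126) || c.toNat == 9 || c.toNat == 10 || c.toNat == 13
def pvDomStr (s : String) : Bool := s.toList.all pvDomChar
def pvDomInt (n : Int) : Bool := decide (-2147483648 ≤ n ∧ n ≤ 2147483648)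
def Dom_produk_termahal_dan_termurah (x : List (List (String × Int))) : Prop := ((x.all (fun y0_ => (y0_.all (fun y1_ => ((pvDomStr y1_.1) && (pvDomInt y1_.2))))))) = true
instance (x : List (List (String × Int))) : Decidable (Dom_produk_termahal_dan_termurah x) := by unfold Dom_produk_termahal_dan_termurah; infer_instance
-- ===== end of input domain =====

-- B replaces A's single combined comparison loop by two stable sorts by price and taking each head; same result, a different (sort-based) algorithm.
-- ===== PORT A =====
-- barang['harga'] on an association list: first match; default 0 only makes the port total (Pre_ guarantees the key is present)
def hargaA (b : List (String × Int)) : Int := (b.lookup "harga").getD 0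

def produk_termahal_dan_termurah (x : List (List (String × Int))) : (List (String × Int)) × (List (String × Int)) :=
  match x with
  | [] => ([], [])  -- x[0] raises IndexError in Python; excluded by Pre_
  | h :: _ =>
    x.foldl (fun (st : (List (String × Int)) × (List (String × Int))) barang =>
      if hargaA barang > hargaA st.1 then (barang, st.2)
      else if hargaA barang < hargaA st.2 then (st.1, barang)
      else st) (h, h)

-- ===== PORT B =====
def hargaB (b : List (String × Int)) : Int := (b.lookup "harga").getD 0

def produk_termahal_dan_termurah_alt (x : List (List (String × Int))) : (List (String × Int)) × (List (String × Int)) :=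
  let naik := PySem.List.sorted x hargaB
  let turun := PySem.List.sorted x hargaB true
  -- [0] on each sorted list; the default only makes the port total (Pre_ excludes the empty list)
  (turun.headD [], naik.headD [])

-- ===== PRECONDITION & SPEC =====
-- Pre_ excludes exactly the inputs on which the Python A raises: the empty list (IndexError on x[0])
-- and lists containing a product without the key "harga" (KeyError).
def Pre_produk_termahal_dan_termurah (x : List (List (String × Int))) : Prop :=
  x ≠ [] ∧ ∀ b ∈ x, (b.map Prod.fst).contains "harga" = true
instance (x : List (List (String × Int))) : Decidable (Pre_produk_termahal_dan_termurah x) := by unfold Pre_produk_termahal_dan_termurah; infer_instance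
def pvWitness_produk_termahal_dan_termurah : (List (List (String × Int))) := [[("nama", 1), ("harga", 5)], [("nama", 2), ("harga", 3)]]

def Spec_produk_termahal_dan_termurah (x : List (List (String × Int))) (out : (List (String × Int)) × (List (String × Int))) : Prop := out = produk_termahal_dan_termurah_alt x
instance (x : List (List (String × Int))) (out : (List (String × Int)) × (List (String × Int))) : Decidable (Spec_produk_termahal_dan_termurah x out) := by unfold Spec_produk_termahal_dan_termurah; infer_instance

-- ===== CLAIM (what is proved, stated in full; the proofs are below) =====
def Claim_equal_produk_termahal_dan_termurah : Prop := ∀ (x : List (List (String × Int))), Dom_produk_termahal_dan_termurah x → Pre_produk_termahal_dan_termurah x → Spec_produk_termahal_dan_termurah x (produk_termahal_dan_termurah x)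

-- ===== LEMMAS AND PROOFS =====

-- A's two running extrema, written as plain fold steps
def maxStep (m b : List (String × Int)) : List (String × Int) :=
  if hargaB m < hargaB b then b else m
def minStep (u b : List (String × Int)) : List (String × Int) :=
  if hargaB b < hargaB u then b else u

-- head of an insertion: the new element lands in front iff 'before' says so w.r.t. the old head
lemma head?_insertBy_cons {α : Type} (before : α → α → Bool) (x y : α) (ys : List α) :
    (PySem.List.insertBy before x (y :: ys)).head? = some (if before x y then x else y) := by
  show (if before x y then x :: y :: ys else y :: PySem.List.insertBy before x ys).head? = _
  split <;> rfl

-- head of the insertion-sort fold = the corresponding running-extremum fold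
lemma head?_foldl_insertBy {α : Type} (before : α → α → Bool) (xs : List α) (acc : List α) :
    (List.foldl (fun acc x => PySem.List.insertBy before x acc) acc xs).head? =
      xs.foldl (fun (m : Option α) x =>
        match m with
        | none => some x
        | some y => if before x y then some x else some y) acc.head? := by
  induction xs generalizing acc with
  | nil => rfl
  | cons a xs ih =>
    simp only [List.foldl]
    rw [ih]
    cases acc with
    | nil => rfl
    | cons y ys =>
      rw [head?_insertBy_cons]
      congr 1
      simp only [List.head?_cons]
      split <;> rfl

lemma head?_sorted_eq_min? (xs : List (List (String × Int))) :
    (PySem.List.sorted xs hargaB).head? = PySem.List.min? xs hargaB := by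
  rw [PySem.List.sorted_eq_foldl_insertBy, head?_foldl_insertBy]
  show List.foldl _ none xs = List.foldl _ none xs
  apply PySem.List.foldl_congr_mem
  intro m b _
  cases m with
  | none => rfl
  | some y => by_cases h : hargaB b < hargaB y <;> simp [h]

lemma head?_sorted_rev_eq_max? (xs : List (List (String × Int))) :
    (PySem.List.sorted xs hargaB true).head? = PySem.List.max? xs hargaB := by
  rw [PySem.List.sorted_rev_eq_foldl_insertBy, head?_foldl_insertBy]
  show List.foldl _ none xs = List.foldl _ none xs
  apply PySem.List.foldl_congr_mem
  intro m b _
  cases m with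
  | none => rfl
  | some y => by_cases h : hargaB y < hargaB b <;> simp [h]

lemma max?_cons_foldl (h : List (String × Int)) (t : List (List (String × Int))) :
    PySem.List.max? (h :: t) hargaB = some (t.foldl maxStep h) := by
  show List.foldl _ (some h) t = _
  induction t generalizing h with
  | nil => rfl
  | cons a t ih =>
    simp only [List.foldl, maxStep]
    split <;> exact ih _

lemma min?_cons_foldl (h : List (String × Int)) (t : List (List (String × Int))) :
    PySem.List.min? (h :: t) hargaB = some (t.foldl minStep h) := by
  show List.foldl _ (some h) t = _
  induction t generalizing h with
  | nil => rfl
  | cons a t ih =>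
    simp only [List.foldl, minStep]
    split <;> exact ih _

-- A's combined loop, under the invariant harga u ≤ harga m, is the pair of the two separate folds
lemma combined_eq_pair (t : List (List (String × Int))) :
    ∀ m u, hargaB u ≤ hargaB m →
      t.foldl (fun st barang =>
        if hargaA barang > hargaA st.1 then (barang, st.2)
        else if hargaA barang < hargaA st.2 then (st.1, barang)
        else st) (m, u) = (t.foldl maxStep m, t.foldl minStep u) := by
  induction t with
  | nil => intro m u _; rfl
  | cons b t ih =>
    intro m u hmu
    have hAB : hargaA = hargaB := rfl
    simp only [List.foldl, maxStep, minStep, hAB]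
    by_cases h1 : hargaB m < hargaB b
    · have h2 : ¬ hargaB b < hargaB u := by omega
      simp only [gt_iff_lt, if_pos h1, if_neg h2]
      exact ih b u (by omega)
    · by_cases h2 : hargaB b < hargaB u
      · simp only [gt_iff_lt, if_neg h1, if_pos h2]
        exact ih m b (by omega)
      · simp only [gt_iff_lt, if_neg h1, if_neg h2]
        exact ih m u hmu

lemma main_equiv (x : List (List (String × Int))) (hne : x ≠ []) :
    produk_termahal_dan_termurah x = produk_termahal_dan_termurah_alt x := by
  match x with
  | [] => exact absurd rfl hne
  | h :: t =>
    show (h :: t).foldl _ (h, h) = _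
    have step1 : (h :: t).foldl (fun (st : (List (String × Int)) × (List (String × Int))) barang =>
        if hargaA barang > hargaA st.1 then (barang, st.2)
        else if hargaA barang < hargaA st.2 then (st.1, barang)
        else st) (h, h) = (t.foldl maxStep h, t.foldl minStep h) := by
      simp only [List.foldl, gt_iff_lt, lt_self_iff_false, if_false]
      exact combined_eq_pair t h h le_rfl
    rw [step1]
    show _ = ((PySem.List.sorted (h :: t) hargaB true).headD [],
              (PySem.List.sorted (h :: t) hargaB).headD [])
    have hmax := head?_sorted_rev_eq_max? (h :: t)
    have hmin := head?_sorted_eq_min? (h :: t)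
    rw [max?_cons_foldl] at hmax
    rw [min?_cons_foldl] at hmin
    rw [List.headD_eq_head?_getD, List.headD_eq_head?_getD, hmax, hmin]
    rfl

-- ===== VERDICT (by name: the statement is the Claim_ definition above) =====
theorem produk_termahal_dan_termurah_spec : Claim_equal_produk_termahal_dan_termurah := by
  intro x _ hpre
  obtain ⟨hne, -⟩ := hpre
  exact main_equiv x hne
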